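-- pv_equiv track=rewrite | github.com/Oli-cpu815/reconall_v_0.1 | reconall.py | filter_waybackurls
-- ===== SOURCE A (Python) =====
-- def filter_waybackurls(urls):
--     important_paths = [
--         "/admin", "/login", "/dashboard",     # admin panels
--         "/api", "/backend", "/ajax",          # API endpoints
--         "/config", "/.env", "/wp-config.php", # configuration files
--         "/uploads", "/images", "/files",      # media or file uploads
--         "/test", "/staging", "/dev",          # development/testing areas
--         "/backup", "/db", "/logs"             # backups and logs
--     ]
--     filtered = []
--     for url in urls:
--         if any(url.lower().endswith(path.lower()) or path.lower() in url.lower() for path in important_paths):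
--             filtered.append(url)
--     return filtered if filtered else ["No important URLs found"]
-- ===== SOURCE B (Python) =====
-- _PATHS = [
--     "/admin", "/login", "/dashboard",
--     "/api", "/backend", "/ajax",
--     "/config", "/.env", "/wp-config.php",
--     "/uploads", "/images", "/files",
--     "/test", "/staging", "/dev",
--     "/backup", "/db", "/logs",
-- ]
--
--
-- def _hit(u):
--     # every interesting path starts with '/', so it is enough to try a
--     # prefix match at each '/' in the url
--     i = u.find('/')
--     while i != -1:
--         for p in _PATHS:
--             if u.startswith(p, i):
--                 return True
--         i = u.find('/', i + 1)
--     return False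
--
--
-- def filter_waybackurls(urls):
--     filtered = [url for url in urls if _hit(url.lower())]
--     return filtered if filtered else ["No important URLs found"]
-- ===== Notes on version B (the rewrite author's own statement) =====
-- stated objective: faster
-- what changed: Instead of running all 18 endswith-or-substring tests over the whole url (re-lowering url and path on every test), B lowercases each url once and walks only its '/' anchors with str.find, trying a prefix match for each pattern there; the endswith clause is dropped as it is subsumed by substring containment.
import Mathlib
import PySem

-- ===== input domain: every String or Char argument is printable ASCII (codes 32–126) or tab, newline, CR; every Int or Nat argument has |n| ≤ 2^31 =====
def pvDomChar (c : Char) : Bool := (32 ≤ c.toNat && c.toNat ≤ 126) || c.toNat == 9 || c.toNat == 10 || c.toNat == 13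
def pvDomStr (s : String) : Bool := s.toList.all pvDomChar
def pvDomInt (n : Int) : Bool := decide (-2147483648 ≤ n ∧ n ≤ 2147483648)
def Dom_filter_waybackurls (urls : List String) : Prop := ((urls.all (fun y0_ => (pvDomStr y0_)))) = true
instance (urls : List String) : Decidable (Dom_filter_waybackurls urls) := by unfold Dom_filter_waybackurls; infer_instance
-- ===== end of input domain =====

-- B lowercases each url once and tries prefix matches only at its '/' anchors,
-- replacing A's 18 endswith-or-substring tests over the whole url; objective: faster
-- (constant-factor); same return values.

-- ===== PORT A =====
def important_paths : List String :=
  ["/admin", "/login", "/dashboard",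
   "/api", "/backend", "/ajax",
   "/config", "/.env", "/wp-config.php",
   "/uploads", "/images", "/files",
   "/test", "/staging", "/dev",
   "/backup", "/db", "/logs"]

def filter_waybackurls (urls : List String) : List String :=
  let filtered := urls.foldl (fun acc url =>
    if important_paths.any (fun path =>
        PySem.Str.endswith (PySem.Str.lower url) (PySem.Str.lower path)
        || PySem.Str.isIn (PySem.Str.lower path) (PySem.Str.lower url))
    then acc ++ [url] else acc) []
  if filtered = [] then ["No important URLs found"] else filtered

-- ===== PORT B =====
def pvPATHS : List String :=
  ["/admin", "/login", "/dashboard",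
   "/api", "/backend", "/ajax",
   "/config", "/.env", "/wp-config.php",
   "/uploads", "/images", "/files",
   "/test", "/staging", "/dev",
   "/backup", "/db", "/logs"]

-- Source B's _hit: u.find('/') advances to each '/' anchor and tries each pattern
-- as a prefix there; as structural recursion on List Char, non-'/' heads are
-- skipped without a check, matching what find skips over.
def pvHit : List Char → Bool
  | [] => false
  | c :: rest =>
      if c == '/' then
        pvPATHS.any (fun p => PySem.Chars.startswith (c :: rest) p.toList) || pvHit rest
      else pvHit rest

def filter_waybackurls_alt (urls : List String) : List String :=
  let filtered := urls.filter (fun url => pvHit (PySem.Str.lower url).toList)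
  if filtered = [] then ["No important URLs found"] else filtered

-- ===== PRECONDITION & SPEC =====
def Spec_filter_waybackurls (urls : List String) (out : List String) : Prop := out = filter_waybackurls_alt urls
instance (urls : List String) (out : List String) : Decidable (Spec_filter_waybackurls urls out) := by unfold Spec_filter_waybackurls; infer_instance

-- ===== CLAIM (what is proved, stated in full; the proofs are below) =====
def Claim_equal_filter_waybackurls : Prop := ∀ (urls : List String), Dom_filter_waybackurls urls → Spec_filter_waybackurls urls (filter_waybackurls urls)

-- ===== LEMMAS AND PROOFS =====

-- every pattern, lowered, is itself (they are lowercase literals)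
lemma pv_lower_paths : ∀ p ∈ important_paths, PySem.Chars.lower p.toList = p.toList := by decide

-- every pattern starts with '/'
lemma pv_head_paths : ∀ p ∈ important_paths, p.toList.head? = some '/' := by decide

lemma pv_paths_eq : pvPATHS = important_paths := rfl

-- the endswith disjunct is subsumed by the substring test
lemma pv_endswith_subsume (L q : List Char) :
    (PySem.Chars.endswith L q || PySem.Chars.isIn q L) = PySem.Chars.isIn q L := by
  cases h : PySem.Chars.endswith L q
  · simp
  · have hs : q <:+ L := (PySem.Chars.endswith_iff L q).mp h
    have : PySem.Chars.isIn q L = true := (PySem.Chars.isIn_iff_infix q L).mpr hs.isInfix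
    simp [this]

-- at a non-'/' head no pattern matches as a prefix
lemma pv_no_match_off_anchor (c : Char) (t : List Char) (hc : (c == '/') = false) :
    important_paths.any (fun p => PySem.Chars.startswith (c :: t) p.toList) = false := by
  rw [List.any_eq_false]
  intro p hp hsw
  have hpre := (PySem.Chars.startswith_iff _ _).mp hsw
  have hh := pv_head_paths p hp
  cases hq : p.toList with
  | nil => simp [hq] at hh
  | cons q0 qs =>
    rw [hq] at hpre hh
    obtain ⟨r, hr⟩ := hpre
    have : q0 = c := by
      have := congrArg List.head? hr
      simp at this hh
      omega
    simp at hh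
    rw [this] at hh
    simp at hc
    exact hc (by rw [← hh])

-- the per-url condition: A's any-over-patterns substring test equals B's anchored scan
lemma pv_cond_eq (L : List Char) :
    important_paths.any (fun p => PySem.Chars.isIn p.toList L) = pvHit L := by
  induction L with
  | nil => decide
  | cons c t ih =>
    have step : ∀ p : String,
        PySem.Chars.isIn p.toList (c :: t)
          = (PySem.Chars.startswith (c :: t) p.toList || PySem.Chars.isIn p.toList t) := by
      intro p
      rw [Bool.eq_iff_iff]
      simp only [PySem.Chars.isIn_iff_infix, PySem.Chars.startswith_iff, Bool.or_eq_true]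
      exact List.infix_cons_iff
    calc important_paths.any (fun p => PySem.Chars.isIn p.toList (c :: t))
        = important_paths.any (fun p =>
            PySem.Chars.startswith (c :: t) p.toList || PySem.Chars.isIn p.toList t) := by
          exact PySem.List.any_congr_mem (fun p _ => step p)
      _ = (important_paths.any (fun p => PySem.Chars.startswith (c :: t) p.toList)
            || important_paths.any (fun p => PySem.Chars.isIn p.toList t)) := by
          rw [Bool.eq_iff_iff]
          simp only [List.any_eq_true, Bool.or_eq_true]
          aesop
      _ = pvHit (c :: t) := by
          cases hc : (c == '/')
          · simp only [pvHit, hc, if_neg Bool.false_ne_true, ← ih,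
              pv_no_match_off_anchor c t hc, Bool.false_or]
          · simp only [pvHit, hc, pv_paths_eq, ih, if_true]

-- the predicates A and B filter with agree on every url
lemma pv_pred_eq (url : String) :
    important_paths.any (fun path =>
        PySem.Str.endswith (PySem.Str.lower url) (PySem.Str.lower path)
        || PySem.Str.isIn (PySem.Str.lower path) (PySem.Str.lower url))
      = pvHit (PySem.Str.lower url).toList := by
  have h1 : important_paths.any (fun path =>
        PySem.Str.endswith (PySem.Str.lower url) (PySem.Str.lower path)
        || PySem.Str.isIn (PySem.Str.lower path) (PySem.Str.lower url))
      = important_paths.any (fun p =>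
        PySem.Chars.isIn p.toList (PySem.Chars.lower url.toList)) := by
    apply PySem.List.any_congr_mem
    intro p hp
    simp only [PySem.Str.endswith_eq, PySem.Str.isIn_eq, PySem.Str.toList_lower]
    rw [pv_lower_paths p hp, pv_endswith_subsume]
  rw [h1, pv_cond_eq]
  simp [PySem.Str.toList_lower]

-- ===== VERDICT (by name: the statement is the Claim_ definition above) =====
theorem filter_waybackurls_spec : Claim_equal_filter_waybackurls := by
  intro urls _
  unfold Spec_filter_waybackurls filter_waybackurls filter_waybackurls_alt
  rw [PySem.List.foldl_append_if_eq_filter]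
  simp only [List.nil_append]
  rw [List.filter_congr (fun url _ => pv_pred_eq url)]
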